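-- pv_equiv track=rewrite | github.com/MuralidharanGanapathy/Hackerrank | Any_Or_All.py | valid
-- ===== SOURCE A (Python) =====
-- def valid(l):
--     flag = False
--     for i in l:
--         if i<0:
--             flag = False
--         else:
--             if str(i) == str(i)[::-1]:
--                 flag = True
--     return flag
-- ===== SOURCE B (Python) =====
-- def valid(l):
--     last = -1
--     for idx, x in enumerate(l):
--         if x < 0:
--             last = idx
--     return any(str(x) == str(x)[::-1] for x in l[last+1:])
-- ===== Notes on version B (the rewrite author's own statement) =====
-- stated objective: simpler
-- what changed: Replaces the single stateful flag loop by two phases: find the index of the last negative element with a cheap integer scan, then test only the suffix after it for a decimal palindrome.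
import Mathlib
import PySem

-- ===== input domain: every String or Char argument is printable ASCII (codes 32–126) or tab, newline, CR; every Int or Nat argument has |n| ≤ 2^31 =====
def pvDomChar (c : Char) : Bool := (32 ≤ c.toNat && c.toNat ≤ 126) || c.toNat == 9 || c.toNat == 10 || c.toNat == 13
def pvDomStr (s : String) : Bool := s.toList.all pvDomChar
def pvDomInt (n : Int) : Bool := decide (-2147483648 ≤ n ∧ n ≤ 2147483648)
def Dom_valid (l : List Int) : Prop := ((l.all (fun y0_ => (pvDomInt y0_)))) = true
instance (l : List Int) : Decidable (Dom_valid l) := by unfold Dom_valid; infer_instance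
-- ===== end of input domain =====

-- B replaces A's single stateful flag loop by a last-negative-index scan followed by a suffix palindrome test (simpler decomposition).


-- ===== PORT A =====
-- str(i) == str(i)[::-1]: s[::-1] is reversal (PySem.Str.slice?_none_none_neg_one), compared on the list side
def pvPal (i : Int) : Bool := (PySem.Int.toStr i).toList = (PySem.Int.toStr i).toList.reverse

def valid (l : List Int) : Bool :=
  l.foldl (fun flag i => if i < 0 then false else if pvPal i then true else flag) false

-- ===== PORT B =====
def pvLastNeg (l : List Int) : Int :=
  (PySem.List.enumerate l 0).foldl (fun last p => if p.2 < 0 then p.1 else last) (-1)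

def valid_alt (l : List Int) : Bool :=
  (PySem.List.slice l (some (pvLastNeg l + 1)) none).any (fun x => pvPal x)

-- ===== PRECONDITION & SPEC =====
def Spec_valid (l : List Int) (out : Bool) : Prop := out = valid_alt l
instance (l : List Int) (out : Bool) : Decidable (Spec_valid l out) := by unfold Spec_valid; infer_instance

-- ===== CLAIM (what is proved, stated in full; the proofs are below) =====
def Claim_equal_valid : Prop := ∀ (l : List Int), Dom_valid l → Spec_valid l (valid l)

-- ===== LEMMAS AND PROOFS =====

theorem pvEnumerate_append (l : List Int) (x : Int) (s : Int) :
    PySem.List.enumerate (l ++ [x]) s = PySem.List.enumerate l s ++ [((s + l.length : Int), x)] := by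
  induction l generalizing s with
  | nil => simp [PySem.List.enumerate_cons, PySem.List.enumerate_nil]
  | cons a t ih =>
      simp only [List.cons_append, PySem.List.enumerate_cons, ih, List.length_cons]
      have hc : (s + 1 + (t.length : Int)) = s + ((t.length + 1 : Nat) : Int) := by push_cast; ring
      rw [hc]

theorem pvLastNeg_append (l : List Int) (x : Int) :
    pvLastNeg (l ++ [x]) = if x < 0 then (l.length : Int) else pvLastNeg l := by
  unfold pvLastNeg
  rw [pvEnumerate_append, List.foldl_append]
  simp

theorem pvLastNeg_bounds (l : List Int) : -1 ≤ pvLastNeg l ∧ pvLastNeg l < l.length := by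
  induction l using List.reverseRecOn with
  | nil => simp [pvLastNeg, PySem.List.enumerate_nil]
  | append_singleton t x ih =>
      rw [pvLastNeg_append]
      rcases ih with ⟨h1, h2⟩
      split_ifs <;> simp <;> try omega


theorem valid_eq_alt (l : List Int) : valid l = valid_alt l := by
  induction l using List.reverseRecOn with
  | nil => simp [valid, valid_alt, pvLastNeg, PySem.List.enumerate_nil, PySem.List.slice]
  | append_singleton t x ih =>
      have hb := pvLastNeg_bounds t
      unfold valid valid_alt
      rw [List.foldl_append, pvLastNeg_append]
      by_cases hx : x < 0
      · have hlen : ((t.length : Int) + 1) = ((t.length + 1 : Nat) : Int) := by push_cast; ring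
        simp only [hx, if_true, List.foldl_cons, List.foldl_nil]
        rw [hlen, PySem.List.slice_from _ (by positivity)]
        simp
      · have h0 : (0 : Int) ≤ pvLastNeg t + 1 := by omega
        simp only [hx, if_false, List.foldl_cons, List.foldl_nil]
        rw [PySem.List.slice_from _ h0]
        have hle : (pvLastNeg t + 1).toNat ≤ t.length := by omega
        rw [List.drop_append_of_le_length hle, List.any_append]
        have ih' : valid t = valid_alt t := ih
        unfold valid valid_alt at ih'
        rw [PySem.List.slice_from _ h0] at ih'
        rw [← ih']
        cases valid t <;> cases h : pvPal x <;> simp [h]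

-- ===== VERDICT (by name: the statement is the Claim_ definition above) =====
theorem valid_spec : Claim_equal_valid := by
  intro l _
  unfold Spec_valid
  exact valid_eq_alt l
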